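-- pv_equiv track=rewrite | github.com/TheoDlmz/AxisRules | axisrules/misc/rankings/VoterDeletionRank.py | compute_VD_rank_score
-- ===== SOURCE A (Python) =====
-- def is_single_peaked(axis, vote):
--     """
--     Check if a vote is single peaked for a given axis
--     """
--     curr = len(vote)+1
--     decr = True
--     for i in range(len(axis)):
--         v = vote[axis[i]]
--         if decr and v > curr:
--             decr = False
--         if not decr and v < curr:
--             return False
--         curr = v
--
--     return True
--
-- def compute_VD_rank_score(axis, votes, weights, min_score = None):
--     """
--     Compute the VD score of an axis for a given set of votes and weights
--     """
--     score = 0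
--     for vote, weight in zip(votes, weights):
--         if not is_single_peaked(axis, vote):
--             score += weight
--             if min_score is not None and score > min_score:
--                 return False, None
--     return True, score
-- ===== SOURCE B (Python) =====
-- def _noninc(seq):
--     for i in range(len(seq) - 1):
--         if seq[i] < seq[i + 1]:
--             return False
--     return True
--
-- def _nondec(seq):
--     for i in range(len(seq) - 1):
--         if seq[i] > seq[i + 1]:
--             return False
--     return True
--
-- def is_single_peaked(axis, vote):
--     """Valley test: ranks along the axis (behind the len(vote)+1 sentinel)
--     must be non-increasing down to the first minimum, then non-decreasing."""
--     seq = [len(vote) + 1] + [vote[a] for a in axis]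
--     m = seq.index(min(seq))
--     return _noninc(seq[:m + 1]) and _nondec(seq[m:])
--
-- def compute_VD_rank_score(axis, votes, weights, min_score=None):
--     score = 0
--     for vote, weight in zip(votes, weights):
--         if not is_single_peaked(axis, vote):
--             score += weight
--             if min_score is not None and score > min_score:
--                 return False, None
--     return True, score
-- ===== Notes on version B (the rewrite author's own statement) =====
-- stated objective: alternative
-- what changed: is_single_peaked's fused decrease/increase flag-flip pass is replaced by a decomposition that prepends the len(vote)+1 sentinel, finds the first occurrence of the minimum rank, and checks the prefix up to it is non-increasing and the suffix from it is non-decreasing; the weighted outer loop is kept.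
-- outside the precondition, e.g. on compute_VD_rank_score([0, 1, 2, 3], [{0: 1, 1: 3, 2: 2}], [1], None): A returns (True, 1), B raises KeyError
import Mathlib
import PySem

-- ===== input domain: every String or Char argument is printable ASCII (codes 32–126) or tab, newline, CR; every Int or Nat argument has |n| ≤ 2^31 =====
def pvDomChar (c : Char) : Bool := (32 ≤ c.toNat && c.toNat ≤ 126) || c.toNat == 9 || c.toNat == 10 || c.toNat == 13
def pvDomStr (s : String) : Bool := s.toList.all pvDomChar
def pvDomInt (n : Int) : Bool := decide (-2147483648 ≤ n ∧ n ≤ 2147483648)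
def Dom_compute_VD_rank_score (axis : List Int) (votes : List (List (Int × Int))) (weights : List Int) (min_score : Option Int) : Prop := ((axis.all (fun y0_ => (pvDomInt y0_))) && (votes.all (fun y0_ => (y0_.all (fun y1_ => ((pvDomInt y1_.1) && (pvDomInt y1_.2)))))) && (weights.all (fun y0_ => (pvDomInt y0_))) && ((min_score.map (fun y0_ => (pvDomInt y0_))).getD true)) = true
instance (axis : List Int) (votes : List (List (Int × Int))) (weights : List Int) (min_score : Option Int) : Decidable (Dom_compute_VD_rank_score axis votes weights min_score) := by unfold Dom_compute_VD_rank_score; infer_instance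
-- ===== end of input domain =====

-- B replaces A's fused decrease/increase flag pass in is_single_peaked by a
-- find-first-minimum-then-two-monotonicity-checks decomposition (objective: alternative).

-- ===== PORT A =====
-- is_single_peaked's loop: state (curr, decr); none = KeyError on vote[axis[i]]
def spLoopA (vote : List (Int × Int)) : List Int → Int → Bool → Option Bool
  | [], _, _ => some true
  | a :: rest, curr, decr =>
    match List.lookup a vote with
    | none => none
    | some v =>
      let decr2 := if decr && decide (v > curr) then false else decr
      if !decr2 && decide (v < curr) then some false
      else spLoopA vote rest v decr2

def is_single_peaked (axis : List Int) (vote : List (Int × Int)) : Option Bool :=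
  spLoopA vote axis ((vote.length : Int) + 1) true

-- the weighted loop over zip(votes, weights); (false, none) also stands in for the
-- KeyError case (none from is_single_peaked), which Pre_ excludes
def vdLoopA (axis : List Int) : List (List (Int × Int) × Int) → Int → Option Int → Bool × Option Int
  | [], score, _ => (true, some score)
  | (vote, weight) :: rest, score, ms =>
    match is_single_peaked axis vote with
    | none => (false, none)
    | some sp =>
      if !sp then
        let score2 := score + weight
        match ms with
        | some m => if decide (score2 > m) then (false, none) else vdLoopA axis rest score2 ms
        | none => vdLoopA axis rest score2 ms
      else vdLoopA axis rest score ms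

def compute_VD_rank_score (axis : List Int) (votes : List (List (Int × Int))) (weights : List Int) (min_score : Option Int) : Bool × Option Int :=
  vdLoopA axis (votes.zip weights) 0 min_score

-- ===== PORT B =====
-- _noninc / _nondec of Source B (adjacent-pair scans)
def nonincB : List Int → Bool
  | [] => true
  | [_] => true
  | x :: y :: r => decide (x ≥ y) && nonincB (y :: r)

def nondecB : List Int → Bool
  | [] => true
  | [_] => true
  | x :: y :: r => decide (x ≤ y) && nondecB (y :: r)

-- seq = [len(vote)+1] + [vote[a] for a in axis]; m = seq.index(min(seq));
-- single-peaked iff seq[:m+1] is non-increasing and seq[m:] is non-decreasing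
def is_single_peaked_alt (axis : List Int) (vote : List (Int × Int)) : Option Bool :=
  match axis.mapM (fun a => List.lookup a vote) with
  | none => none
  | some vals =>
    let seq := ((vote.length : Int) + 1) :: vals
    let mn := (PySem.List.min? seq (fun x => x)).getD 0
    let m := (PySem.List.index? seq mn).getD 0
    some (nonincB (seq.take (m + 1)) && nondecB (seq.drop m))

def vdLoopB (axis : List Int) : List (List (Int × Int) × Int) → Int → Option Int → Bool × Option Int
  | [], score, _ => (true, some score)
  | (vote, weight) :: rest, score, ms =>
    match is_single_peaked_alt axis vote with
    | none => (false, none)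
    | some sp =>
      if !sp then
        let score2 := score + weight
        match ms with
        | some m => if decide (score2 > m) then (false, none) else vdLoopB axis rest score2 ms
        | none => vdLoopB axis rest score2 ms
      else vdLoopB axis rest score ms

def compute_VD_rank_score_alt (axis : List Int) (votes : List (List (Int × Int))) (weights : List Int) (min_score : Option Int) : Bool × Option Int :=
  vdLoopB axis (votes.zip weights) 0 min_score

-- ===== PRECONDITION & SPEC =====
-- Pre_ excludes inputs where some vote paired with a weight is missing an axis key:
-- there Python A raises KeyError or returns a value only because an early exit
-- happens before the missing key is read, while B's full seq construction raises.
def Pre_compute_VD_rank_score (axis : List Int) (votes : List (List (Int × Int))) (weights : List Int) (min_score : Option Int) : Prop :=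
  ∀ p ∈ votes.zip weights, ∀ a ∈ axis, a ∈ p.1.map Prod.fst
instance (axis : List Int) (votes : List (List (Int × Int))) (weights : List Int) (min_score : Option Int) : Decidable (Pre_compute_VD_rank_score axis votes weights min_score) := by unfold Pre_compute_VD_rank_score; infer_instance

def pvWitness_compute_VD_rank_score : List Int × (List (List (Int × Int))) × List Int × Option Int :=
  ([0, 1], [[(0, 2), (1, 1)], [(1, 3), (0, 1)]], [1, 2], some 5)

def Spec_compute_VD_rank_score (axis : List Int) (votes : List (List (Int × Int))) (weights : List Int) (min_score : Option Int) (out : Bool × Option Int) : Prop := out = compute_VD_rank_score_alt axis votes weights min_score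
instance (axis : List Int) (votes : List (List (Int × Int))) (weights : List Int) (min_score : Option Int) (out : Bool × Option Int) : Decidable (Spec_compute_VD_rank_score axis votes weights min_score out) := by unfold Spec_compute_VD_rank_score; infer_instance

-- ===== CLAIM (what is proved, stated in full; the proofs are below) =====
def Claim_equal_compute_VD_rank_score : Prop := ∀ (axis : List Int) (votes : List (List (Int × Int))) (weights : List Int) (min_score : Option Int), Dom_compute_VD_rank_score axis votes weights min_score → Pre_compute_VD_rank_score axis votes weights min_score → Spec_compute_VD_rank_score axis votes weights min_score (compute_VD_rank_score axis votes weights min_score)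

-- ===== LEMMAS AND PROOFS =====

-- pure version of A's flag pass, on the already-looked-up values
def spPure : List Int → Int → Bool → Bool
  | [], _, _ => true
  | v :: r, curr, decr =>
    let decr2 := if decr && decide (v > curr) then false else decr
    if !decr2 && decide (v < curr) then false
    else spPure r v decr2

-- B's valley test on a nonempty sequence, as a named function of the sequence
def valleyB (seq : List Int) : Bool :=
  let mn := (PySem.List.min? seq (fun x => x)).getD 0
  let m := (PySem.List.index? seq mn).getD 0
  nonincB (seq.take (m + 1)) && nondecB (seq.drop m)

theorem spPure_false (vals : List Int) : ∀ curr, spPure vals curr false = nondecB (curr :: vals) := by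
  induction vals with
  | nil => intro curr; simp [spPure, nondecB]
  | cons v r ih =>
    intro curr
    by_cases h : v < curr
    · simp [spPure, h, nondecB, show ¬ curr ≤ v by omega]
    · simp [spPure, h, nondecB, show curr ≤ v by omega, ih v]

theorem nondecB_head_le (x y : Int) (xs : List Int) (h : nondecB (x :: xs) = true) (hy : y ∈ xs) : x ≤ y := by
  induction xs generalizing x with
  | nil => simp at hy
  | cons z r ih =>
    simp only [nondecB, Bool.and_eq_true, decide_eq_true_eq] at h
    rcases List.mem_cons.mp hy with rfl | hy'
    · exact h.1
    · exact le_trans h.1 (ih z h.2 hy')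

-- the heart of the equivalence: A's flag pass (started descending) is B's valley test
theorem spPure_true (vals : List Int) : ∀ curr, spPure vals curr true = valleyB (curr :: vals) := by
  induction vals with
  | nil =>
    intro curr
    simp [spPure, valleyB, PySem.List.min?, PySem.List.index?, nonincB, nondecB]
  | cons v r ih =>
    intro curr
    have hmn := PySem.List.min?_id_cons (x := curr) (t := v :: r)
    by_cases hvc : curr < v
    · -- strict increase at once: A checks the rest is non-decreasing
      have hL : spPure (v :: r) curr true = nondecB (v :: r) := by
        simp [spPure, show v > curr from hvc, show ¬ v < curr by omega, spPure_false]
      rw [hL]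
      set mn := ((v :: r).foldl min curr) with hmndef
      have hmem : mn ∈ curr :: v :: r := PySem.List.min?_mem (key := fun x => x) hmn
      have hmin : ∀ y ∈ curr :: v :: r, mn ≤ y := fun y hy => PySem.List.min?_isMin (key := fun x => x) hmn y hy
      by_cases hc : mn = curr
      · -- first minimum is the sentinel: whole sequence must be non-decreasing
        have hidx : PySem.List.index? (curr :: v :: r) mn = some 0 := by
          rw [hc]; exact PySem.List.index?_cons_self curr (v :: r)
        simp only [valleyB, hmn, Option.getD_some, hidx]
        simp [nonincB, nondecB, show curr ≤ v by omega]
      · -- minimum lies strictly below curr: both sides are false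
        have hmn_lt : mn < curr := lt_of_le_of_ne (hmin curr (by simp)) hc
        have hmem' : mn ∈ v :: r := by
          rcases List.mem_cons.mp hmem with h' | h'
          · exact absurd h' hc
          · exact h'
        obtain ⟨k, hk⟩ := (PySem.List.index?_isSome_iff (v :: r) mn).mpr hmem' |> Option.isSome_iff_exists.mp
        have hidx : PySem.List.index? (curr :: v :: r) mn = some (k + 1) := by
          rw [PySem.List.index?_cons_of_ne (v :: r) (fun h => hc h.symm), hk]; rfl
        have hLHS : nondecB (v :: r) = false := by
          by_contra h
          have h' : nondecB (v :: r) = true := by revert h; cases nondecB (v :: r) <;> simp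
          have : v ≤ mn := by
            rcases List.mem_cons.mp hmem' with h'' | h''
            · omega
            · exact nondecB_head_le v mn r h' h''
          omega
        simp only [valleyB, hmn, Option.getD_some, hidx]
        rw [show (curr :: v :: r).take (k + 1 + 1) = curr :: v :: r.take k from by simp,
            show (curr :: v :: r).drop (k + 1) = (v :: r).drop k from rfl]
        rw [hLHS, show nonincB (curr :: v :: r.take k) = false from by
              simp [nonincB, show ¬ curr ≥ v by omega]]
        simp
    · -- v ≤ curr: A keeps descending; both sides reduce to the tail problem
      have hL : spPure (v :: r) curr true = spPure r v true := by
        simp [spPure, show ¬ v > curr by omega]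
      rw [hL, ih v]
      have hfold : (v :: r).foldl min curr = r.foldl min v := by
        simp [List.foldl_cons, min_eq_right (show v ≤ curr by omega)]
      have hmn' := PySem.List.min?_id_cons (x := v) (t := r)
      set mn := r.foldl min v with hmndef
      have hmem : mn ∈ v :: r := PySem.List.min?_mem (key := fun x => x) hmn'
      have hmin : ∀ y ∈ v :: r, mn ≤ y := fun y hy => PySem.List.min?_isMin (key := fun x => x) hmn' y hy
      have hmnle : mn ≤ v := hmin v (by simp)
      by_cases hc : mn = curr
      · -- then curr = v = mn and both tests are plain non-decreasing checks
        have hveq : v = curr := by omega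
        have hidxS : PySem.List.index? (curr :: v :: r) mn = some 0 := by
          rw [hc]; exact PySem.List.index?_cons_self curr (v :: r)
        have hidxT : PySem.List.index? (v :: r) mn = some 0 := by
          rw [show mn = v by omega]; exact PySem.List.index?_cons_self v r
        simp only [valleyB, hmn', hmn, hfold, Option.getD_some, hidxS, hidxT]
        simp [nonincB, nondecB, hveq]
      · -- the first minimum sits in the tail: peel one step off both slices
        obtain ⟨k, hk⟩ := Option.isSome_iff_exists.mp ((PySem.List.index?_isSome_iff (v :: r) mn).mpr hmem)
        have hidxS : PySem.List.index? (curr :: v :: r) mn = some (k + 1) := by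
          rw [PySem.List.index?_cons_of_ne (v :: r) (fun h => hc h.symm), hk]; rfl
        simp only [valleyB, hmn', hmn, hfold, Option.getD_some, hidxS, hk]
        rw [show (curr :: v :: r).take (k + 1 + 1) = curr :: (v :: r).take (k + 1) from by simp,
            show (curr :: v :: r).drop (k + 1) = (v :: r).drop k from rfl]
        rw [show (v :: r).take (k + 1) = v :: r.take k from by simp]
        simp [nonincB, show curr ≥ v by omega]

theorem spLoopA_mapM (vote : List (Int × Int)) (axis : List Int) :
    ∀ (vals : List Int) (curr : Int) (decr : Bool),
      axis.mapM (fun a => List.lookup a vote) = some vals →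
      spLoopA vote axis curr decr = some (spPure vals curr decr) := by
  induction axis with
  | nil => intro vals curr decr h; simp [List.mapM_nil] at h; subst h; simp [spLoopA, spPure]
  | cons a rest ih =>
    intro vals curr decr h
    rw [List.mapM_cons] at h
    cases hl : List.lookup a vote with
    | none => simp [hl] at h
    | some v =>
      cases hrest : rest.mapM (fun a => List.lookup a vote) with
      | none => simp [hl, hrest] at h
      | some vs =>
        rw [hl, hrest] at h
        obtain rfl : v :: vs = vals := by simpa using h
        show (match List.lookup a vote with
              | none => none
              | some v =>
                let decr2 := if decr && decide (v > curr) then false else decr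
                if !decr2 && decide (v < curr) then some false
                else spLoopA vote rest v decr2) = _
        rw [hl]
        set decr2 := if decr && decide (v > curr) then false else decr with hd2
        show (if !decr2 && decide (v < curr) then some false else spLoopA vote rest v decr2)
            = some (if !decr2 && decide (v < curr) then false else spPure vs v decr2)
        cases hb : (!decr2 && decide (v < curr)) with
        | true => simp
        | false => simp [ih vs v decr2 hrest]

theorem mapM_isSome (vote : List (Int × Int)) (axis : List Int)
    (h : ∀ a ∈ axis, (List.lookup a vote).isSome) :
    ∃ vals, axis.mapM (fun a => List.lookup a vote) = some vals := by
  induction axis with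
  | nil => exact ⟨[], rfl⟩
  | cons a rest ih =>
    obtain ⟨v, hv⟩ := Option.isSome_iff_exists.mp (h a (by simp))
    obtain ⟨vs, hvs⟩ := ih (fun x hx => h x (by simp [hx]))
    exact ⟨v :: vs, by rw [List.mapM_cons, hv, hvs]; rfl⟩

theorem lookup_isSome_of_mem_fst (a : Int) (p : List (Int × Int)) (h : a ∈ p.map Prod.fst) :
    (List.lookup a p).isSome := by
  induction p with
  | nil => simp at h
  | cons q t ih =>
    by_cases hq : a = q.1
    · simp [List.lookup, hq]
    · simp only [List.map_cons, List.mem_cons] at h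
      simp [List.lookup, show (a == q.1) = false by simpa using hq, ih (h.resolve_left hq)]

theorem sp_eq (axis : List Int) (vote : List (Int × Int))
    (h : ∀ a ∈ axis, (List.lookup a vote).isSome) :
    is_single_peaked axis vote = is_single_peaked_alt axis vote := by
  obtain ⟨vals, hm⟩ := mapM_isSome vote axis h
  unfold is_single_peaked is_single_peaked_alt
  rw [hm, spLoopA_mapM vote axis vals _ true hm, spPure_true]
  rfl

theorem vdLoop_eq (axis : List Int) (l : List (List (Int × Int) × Int)) :
    ∀ (score : Int) (ms : Option Int),
      (∀ p ∈ l, ∀ a ∈ axis, a ∈ p.1.map Prod.fst) →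
      vdLoopA axis l score ms = vdLoopB axis l score ms := by
  induction l with
  | nil => intros; rfl
  | cons p rest ih =>
    intro score ms h
    obtain ⟨vote, weight⟩ := p
    have hsp : is_single_peaked axis vote = is_single_peaked_alt axis vote :=
      sp_eq axis vote (fun a ha => lookup_isSome_of_mem_fst a vote (h (vote, weight) (List.mem_cons_self) a ha))
    have hrest : ∀ s m, vdLoopA axis rest s m = vdLoopB axis rest s m :=
      fun s m => ih s m (fun q hq => h q (by simp [hq]))
    show (match is_single_peaked axis vote with
          | none => (false, none)
          | some sp =>
            if !sp then
              let score2 := score + weight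
              match ms with
              | some m => if decide (score2 > m) then (false, none) else vdLoopA axis rest score2 ms
              | none => vdLoopA axis rest score2 ms
            else vdLoopA axis rest score ms) = _
    rw [hsp]
    have eB : vdLoopB axis ((vote, weight) :: rest) score ms
        = (match is_single_peaked_alt axis vote with
           | none => (false, none)
           | some sp =>
             if !sp then
               let score2 := score + weight
               match ms with
               | some m => if decide (score2 > m) then (false, none) else vdLoopB axis rest score2 ms
               | none => vdLoopB axis rest score2 ms
             else vdLoopB axis rest score ms) := rfl
    rw [eB]
    cases is_single_peaked_alt axis vote with
    | none => rfl
    | some sp =>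
      cases sp <;> cases ms <;> simp [hrest]

-- ===== VERDICT (by name: the statement is the Claim_ definition above) =====
theorem compute_VD_rank_score_spec : Claim_equal_compute_VD_rank_score := by
  intro axis votes weights min_score _ hpre
  unfold Spec_compute_VD_rank_score compute_VD_rank_score compute_VD_rank_score_alt
  exact vdLoop_eq axis (votes.zip weights) 0 min_score hpre
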